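-- pv_equiv track=rewrite | github.com/prchS/2XC3_Group20_Winter2023 | submission/Lab1_exp2.py | find_min_index2
-- ===== SOURCE A (Python) =====
-- def find_min_index2(L, n ,m):
--     min_index = n
--     max_index = n
--     for i in range(n+1, m):
--         if L[i] < L[min_index]:
--             min_index = i
--         if L[i] >= L[max_index]:
--             max_index = i
--
--
--     return (min_index,max_index)
-- ===== SOURCE B (Python) =====
-- def find_min_index2(L, n, m):
--     if m <= n + 1:
--         return (n, n)
--     min_index = min(range(n, m), key=lambda i: L[i])
--     max_index = max(range(m - 1, n - 1, -1), key=lambda i: L[i])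
--     return (min_index, max_index)
-- ===== Notes on version B (the rewrite author's own statement) =====
-- stated objective: idiomatic
-- what changed: Replaces the single combined index-tracking loop by an empty-range guard plus two library reductions: min(range(n,m), key=...) for the first minimum and max over the reversed range for the last maximum (matching A's >= tie-break).
import Mathlib
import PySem

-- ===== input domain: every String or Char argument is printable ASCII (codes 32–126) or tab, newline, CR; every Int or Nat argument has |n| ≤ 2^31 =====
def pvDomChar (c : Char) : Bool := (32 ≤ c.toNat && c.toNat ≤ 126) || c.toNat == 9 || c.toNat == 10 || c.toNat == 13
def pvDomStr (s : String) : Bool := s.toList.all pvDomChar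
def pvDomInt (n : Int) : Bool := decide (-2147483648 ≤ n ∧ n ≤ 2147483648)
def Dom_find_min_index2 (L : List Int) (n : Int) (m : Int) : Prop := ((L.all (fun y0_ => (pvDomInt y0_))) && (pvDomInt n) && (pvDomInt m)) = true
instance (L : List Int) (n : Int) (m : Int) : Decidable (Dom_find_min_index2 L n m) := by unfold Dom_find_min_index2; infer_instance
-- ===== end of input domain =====

-- B replaces A's combined index loop by a guard plus two reductions (first-min forward, first-max over the reversed range); same cost, proved to return the same pair.

-- ===== PORT A =====
-- one pass over range(n+1, m), updating min on '<' and max on '>='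
def find_min_index2 (L : List Int) (n : Int) (m : Int) : Int × Int :=
  (PySem.List.pyRange (n + 1) m 1).foldl
    (fun p i =>
      (if PySem.List.pyGetD L i 0 < PySem.List.pyGetD L p.1 0 then i else p.1,
       if PySem.List.pyGetD L i 0 ≥ PySem.List.pyGetD L p.2 0 then i else p.2))
    (n, n)

-- ===== PORT B =====
-- min(iterable, key): first element with minimal key (0 unreachable: callers pass nonempty ranges)
def pyMinByKey (key : Int → Int) : List Int → Int
  | [] => 0
  | c :: t => t.foldl (fun b i => if key i < key b then i else b) c

-- max(iterable, key): first element with maximal key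
def pyMaxByKey (key : Int → Int) : List Int → Int
  | [] => 0
  | c :: t => t.foldl (fun b i => if key i > key b then i else b) c

def find_min_index2_alt (L : List Int) (n : Int) (m : Int) : Int × Int :=
  if m ≤ n + 1 then (n, n)
  else
    (pyMinByKey (fun i => PySem.List.pyGetD L i 0) (PySem.List.pyRange n m 1),
     pyMaxByKey (fun i => PySem.List.pyGetD L i 0) (PySem.List.pyRange (m - 1) (n - 1) (-1)))

-- ===== PRECONDITION & SPEC =====
-- Excludes exactly the inputs where Python A raises IndexError: a nonempty range whose
-- indices n .. m-1 are not all valid (possibly negative, wrapping) indices of L.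
def Pre_find_min_index2 (L : List Int) (n : Int) (m : Int) : Prop :=
  m ≤ n + 1 ∨ (-(L.length : Int) ≤ n ∧ m ≤ (L.length : Int))
instance (L : List Int) (n : Int) (m : Int) : Decidable (Pre_find_min_index2 L n m) := by unfold Pre_find_min_index2; infer_instance

def pvWitness_find_min_index2 : List Int × Int × Int := ([3, 1, 2], 0, 3)

def Spec_find_min_index2 (L : List Int) (n : Int) (m : Int) (out : Int × Int) : Prop := out = find_min_index2_alt L n m
instance (L : List Int) (n : Int) (m : Int) (out : Int × Int) : Decidable (Spec_find_min_index2 L n m out) := by unfold Spec_find_min_index2; infer_instance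

-- ===== CLAIM (what is proved, stated in full; the proofs are below) =====
def Claim_equal_find_min_index2 : Prop := ∀ (L : List Int) (n : Int) (m : Int), Dom_find_min_index2 L n m → Pre_find_min_index2 L n m → Spec_find_min_index2 L n m (find_min_index2 L n m)

-- ===== LEMMAS AND PROOFS =====

-- A's pair-valued foldl splits into the two independent min- and max-folds
theorem foldl_pair_split (g : Int → Int) (l : List Int) (a b : Int) :
    l.foldl (fun p i => (if g i < g p.1 then i else p.1, if g i ≥ g p.2 then i else p.2)) (a, b)
      = (l.foldl (fun c i => if g i < g c then i else c) a,
         l.foldl (fun c i => if g i ≥ g c then i else c) b) := by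
  induction l generalizing a b with
  | nil => rfl
  | cons x t ih => simpa using ih _ _

-- absorbing two trailing fold steps of the '>' fold into one pre-combined element
theorem fgt_step (g : Int → Int) (r x a : Int) :
    (if g a > g (if g x > g r then x else r) then a else (if g x > g r then x else r))
      = (if g (if g x ≥ g a then x else a) > g r then (if g x ≥ g a then x else a) else r) := by
  split_ifs <;> omega

theorem pyMaxByKey_two_step (g : Int → Int) (ys : List Int) (x a : Int) :
    pyMaxByKey g (ys ++ [x, a]) = pyMaxByKey g (ys ++ [if g x ≥ g a then x else a]) := by
  cases ys with
  | nil => simp only [List.nil_append, pyMaxByKey, List.foldl]; split_ifs <;> omega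
  | cons c t =>
      simp only [List.cons_append, pyMaxByKey, List.foldl_append, List.foldl]
      exact fgt_step g _ x a

-- the forward '≥'-update fold equals Python's max-with-key over the reversed candidates
theorem fge_foldl_eq_rev_max (g : Int → Int) :
    ∀ (l : List Int) (a : Int),
      l.foldl (fun b i => if g i ≥ g b then i else b) a = pyMaxByKey g (l.reverse ++ [a]) := by
  intro l
  induction l with
  | nil => intro a; rfl
  | cons x t ih =>
      intro a
      have h2 : pyMaxByKey g (t.reverse ++ [x, a])
          = pyMaxByKey g (t.reverse ++ [if g x ≥ g a then x else a]) :=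
        pyMaxByKey_two_step g t.reverse x a
      calc (x :: t).foldl (fun b i => if g i ≥ g b then i else b) a
          = t.foldl (fun b i => if g i ≥ g b then i else b) (if g x ≥ g a then x else a) := rfl
        _ = pyMaxByKey g (t.reverse ++ [if g x ≥ g a then x else a]) := ih _
        _ = pyMaxByKey g (t.reverse ++ [x, a]) := h2.symm
        _ = pyMaxByKey g ((x :: t).reverse ++ [a]) := by simp

-- ===== VERDICT (by name: the statement is the Claim_ definition above) =====
theorem find_min_index2_spec : Claim_equal_find_min_index2 := by
  intro L n m _ _
  unfold Spec_find_min_index2 find_min_index2 find_min_index2_alt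
  by_cases h : m ≤ n + 1
  · rw [if_pos h, PySem.List.pyRange_one_eq_nil (by omega)]
    rfl
  · rw [if_neg h]
    have hnm : n < m := by omega
    rw [foldl_pair_split (fun i => PySem.List.pyGetD L i 0), Prod.mk.injEq]
    constructor
    · -- min component: same fold, B's head is A's initial accumulator
      rw [PySem.List.pyRange_one_cons hnm]
      rfl
    · -- max component: reverse-order reduction
      have hrev : PySem.List.pyRange (m - 1) (n - 1) (-1)
          = (PySem.List.pyRange n m 1).reverse := by
        rw [PySem.List.pyRange_neg_one_eq_reverse]
        norm_num
      rw [hrev, PySem.List.pyRange_one_cons hnm]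
      have := fge_foldl_eq_rev_max (fun i => PySem.List.pyGetD L i 0) (PySem.List.pyRange (n + 1) m 1) n
      simpa using this
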